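-- pv_equiv track=rewrite | github.com/Python-Othello-team/Othello | end.py | let_stone
-- ===== SOURCE A (Python) =====
-- def color_check(color):
--     if color == 1 or color == 2:
--         return True
--     else:
--         return False
--
-- def check_place(color, board, x, y):
--     if not color_check(color): return False #유효한 색인지 확인
--     if x >= 8 or x < 0 or y >= 8 or y < 0: return False #위치가 범위를 벗어나는지 확인
--     if board[x][y] != 0: return False #칸이 비어있는지 확인
--     dx = [0, 0, -1, 1, -1, -1, 1, 1]
--     dy = [-1, 1, 0, 0, -1, 1, -1, 1]
--     for i in range(8):
--         ddx, ddy = x, y #ddx, ddy => 현재 탐색중인 좌표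
--         cnt = 0
--         while True:
--             if ddx + dx[i] >= 8 or ddx + dx[i] < 0 or ddy + dy[i] >= 8 or ddy + dy[i] < 0: break #범위를 벗어나는지 확인
--             ddx += dx[i] #좌표 이동
--             ddy += dy[i]
--             if board[ddx][ddy] == 0: break #빈칸이면 종료
--             elif board[ddx][ddy] != color: cnt += 1 #시작 위치 기준으로 다른 색의 돌이면 cnt + 1
--             else:
--                 if cnt == 0: break #바로 옆칸이라면 (사이에 바꿀 다른색 돌이 없다면 종료)
--                 else: return True
--     return False
--
-- def let_stone(color, board, x, y):
--     if not check_place(color, board, x, y): return board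
--     dx = [0, 0, -1, 1, -1, -1, 1, 1]
--     dy = [-1, 1, 0, 0, -1, 1, -1, 1]
--     board[x][y] = color
--     for i in range(8):
--         ddx, ddy = x, y #ddx, ddy => 현재 탐색중인 위치
--         cnt = 0
--         while True:
--             if ddx + dx[i] >= 8 or ddx + dx[i] < 0 or ddy + dy[i] >= 8 or ddy + dy[i] < 0: break #범위를 벗어나는지 확인
--             ddx += dx[i]
--             ddy += dy[i]
--             if board[ddx][ddy] == 0: break
--             elif board[ddx][ddy] == color:
--                 dddx, dddy = x, y #dddx, dddy => 탐색중인 바꿀 돌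
--                 for _ in range(cnt):
--                     dddx += dx[i]
--                     dddy += dy[i]
--                     board[dddx][dddy] = color
--             elif board[ddx][ddy] != color: cnt += 1
--     return board
-- ===== SOURCE B (Python) =====
-- def let_stone(color, board, x, y):
--     # B mutates `board` in place and returns it, exactly like A.
--     if color != 1 and color != 2:
--         return board
--     if x >= 8 or x < 0 or y >= 8 or y < 0:
--         return board
--     if board[x][y] != 0:
--         return board
--     dirs = [(0, -1), (0, 1), (-1, 0), (1, 0), (-1, -1), (-1, 1), (1, -1), (1, 1)]
--
--     def run(dx, dy):
--         # the ray of nonzero cell values from (x,y) in direction (dx,dy)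
--         vals = []
--         i, j = x + dx, y + dy
--         while 0 <= i < 8 and 0 <= j < 8:
--             v = board[i][j]
--             if v == 0:
--                 break
--             vals.append(v)
--             i += dx
--             j += dy
--         return vals
--
--     def captures(vals):
--         for q, v in enumerate(vals):
--             if v == color:
--                 return q >= 1
--         return False
--
--     if not any(captures(run(dx, dy)) for dx, dy in dirs):
--         return board
--     board[x][y] = color
--     for dx, dy in dirs:
--         vals = run(dx, dy)
--         # flip count: stones seen before the LAST own-color stone on the ray
--         # (A keeps scanning past the first sandwich; this reproduces it exactly)
--         n = opp = 0
--         for v in vals: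
--             if v == color:
--                 n = opp
--             else:
--                 opp += 1
--         for k in range(1, n + 1):
--             board[x + k * dx][y + k * dy] = color
--     return board
-- ===== Notes on version B (the rewrite author's own statement) =====
-- stated objective: alternative
-- what changed: Per direction B reads the ray of nonzero stones once into a list and computes the flip count in closed form (stones seen before the last own-color stone), then applies all flips in one pass, instead of A's mutate-during-scan which re-walks the prefix with an inner flip loop at every own-color stone; the placement test is likewise a single scan of the collected ray per direction.
import Mathlib
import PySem

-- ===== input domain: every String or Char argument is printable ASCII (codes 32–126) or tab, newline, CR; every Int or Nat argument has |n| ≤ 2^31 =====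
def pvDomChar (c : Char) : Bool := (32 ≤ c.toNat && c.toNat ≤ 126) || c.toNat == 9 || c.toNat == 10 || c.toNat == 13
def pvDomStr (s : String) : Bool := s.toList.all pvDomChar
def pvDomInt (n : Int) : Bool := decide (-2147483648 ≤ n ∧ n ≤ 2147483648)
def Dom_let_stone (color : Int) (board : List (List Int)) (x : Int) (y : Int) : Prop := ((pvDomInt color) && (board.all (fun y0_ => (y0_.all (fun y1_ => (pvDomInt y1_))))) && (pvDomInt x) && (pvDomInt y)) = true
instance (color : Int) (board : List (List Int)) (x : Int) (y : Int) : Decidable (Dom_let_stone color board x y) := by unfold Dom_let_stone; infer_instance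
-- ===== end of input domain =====

-- B replaces A's mutate-during-scan (which re-walks the flipped prefix with an inner
-- for-loop at every own-color stone) by one collect-then-apply pass per direction.
-- Both Pythons mutate `board` in place identically; the theorem is about the return value.

-- ===== PORT A =====
-- board[i][j] read / write; every call site is guarded by 0 ≤ i, j < 8, so plain
-- toNat indexing with a default is exact there (shared by both ports).
def get2 (b : List (List Int)) (i j : Int) : Int := (b.getD i.toNat []).getD j.toNat 0
def set2 (b : List (List Int)) (i j v : Int) : List (List Int) :=
  b.set i.toNat ((b.getD i.toNat []).set j.toNat v)

def dxA : List Int := [0, 0, -1, 1, -1, -1, 1, 1]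
def dyA : List Int := [-1, 1, 0, 0, -1, 1, -1, 1]

def color_check (color : Int) : Bool := color == 1 || color == 2

-- check_place's `while True` walk; positions stay in [0,8), so 8 fuel is exact
def cpWalk (color : Int) (board : List (List Int)) (dx dy : Int) :
    Int → Int → Int → Nat → Bool
  | _, _, _, 0 => false
  | ddx, ddy, cnt, f+1 =>
    if ddx + dx ≥ 8 ∨ ddx + dx < 0 ∨ ddy + dy ≥ 8 ∨ ddy + dy < 0 then false
    else
      if get2 board (ddx + dx) (ddy + dy) = 0 then false
      else if get2 board (ddx + dx) (ddy + dy) ≠ color then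
        cpWalk color board dx dy (ddx + dx) (ddy + dy) (cnt + 1) f
      else if cnt = 0 then false else true

def check_place (color : Int) (board : List (List Int)) (x y : Int) : Bool :=
  if ¬ color_check color then false
  else if x ≥ 8 ∨ x < 0 ∨ y ≥ 8 ∨ y < 0 then false
  else if get2 board x y ≠ 0 then false
  else (PySem.List.pyRange 0 8 1).any fun i =>
    cpWalk color board (dxA.getD i.toNat 0) (dyA.getD i.toNat 0) x y 0 8

-- `for _ in range(cnt): dddx += dx; dddy += dy; board[dddx][dddy] = color`
def lsFlip (color dx dy : Int) : List (List Int) → Int → Int → Nat → List (List Int)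
  | b, _, _, 0 => b
  | b, u, v, n+1 => lsFlip color dx dy (set2 b (u + dx) (v + dy) color) (u + dx) (v + dy) n

-- let_stone's `while True` walk (same 8-fuel bound as cpWalk)
def lsWalk (color x y dx dy : Int) :
    List (List Int) → Int → Int → Int → Nat → List (List Int)
  | b, _, _, _, 0 => b
  | b, ddx, ddy, cnt, f+1 =>
    if ddx + dx ≥ 8 ∨ ddx + dx < 0 ∨ ddy + dy ≥ 8 ∨ ddy + dy < 0 then b
    else
      if get2 b (ddx + dx) (ddy + dy) = 0 then b
      else if get2 b (ddx + dx) (ddy + dy) = color then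
        lsWalk color x y dx dy (lsFlip color dx dy b x y cnt.toNat) (ddx + dx) (ddy + dy) cnt f
      else lsWalk color x y dx dy b (ddx + dx) (ddy + dy) (cnt + 1) f

def let_stone (color : Int) (board : List (List Int)) (x : Int) (y : Int) : List (List Int) :=
  if ¬ (check_place color board x y = true) then board
  else
    (PySem.List.pyRange 0 8 1).foldl
      (fun b i => lsWalk color x y (dxA.getD i.toNat 0) (dyA.getD i.toNat 0) b x y 0 8)
      (set2 board x y color)

-- ===== PORT B =====
-- the ray of nonzero cell values from (x,y) in direction (dx,dy) (Source B's `run`)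
def runAux (board : List (List Int)) (dx dy : Int) : Int → Int → Nat → List Int
  | _, _, 0 => []
  | i, j, f+1 =>
    if 0 ≤ i ∧ i < 8 ∧ 0 ≤ j ∧ j < 8 then
      if get2 board i j = 0 then []
      else get2 board i j :: runAux board dx dy (i + dx) (j + dy) f
    else []

def runB (board : List (List Int)) (x y dx dy : Int) : List Int :=
  runAux board dx dy (x + dx) (y + dy) 8

-- Source B's `captures`: first own-color value on the ray, at index ≥ 1?
def capAux (color : Int) : List Int → Nat → Bool
  | [], _ => false
  | v :: vs, q => if v = color then decide (1 ≤ q) else capAux color vs (q + 1)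

def capturesB (color : Int) (vals : List Int) : Bool := capAux color vals 0

-- Source B's flip-count fold: stones seen before the last own-color stone
def flipCount (color : Int) (vals : List Int) : Int :=
  (vals.foldl (fun (p : Int × Int) v => if v = color then (p.2, p.2) else (p.1, p.2 + 1)) (0, 0)).1

-- Source B's `for k in range(1, n+1): board[x+k*dx][y+k*dy] = color`
def flipF (color x y dx dy : Int) (b : List (List Int)) (n : Int) : List (List Int) :=
  (PySem.List.pyRange 1 (n + 1) 1).foldl (fun bb k => set2 bb (x + k * dx) (y + k * dy) color) b

def dirsB : List (Int × Int) := [(0, -1), (0, 1), (-1, 0), (1, 0), (-1, -1), (-1, 1), (1, -1), (1, 1)]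

def let_stone_alt (color : Int) (board : List (List Int)) (x : Int) (y : Int) : List (List Int) :=
  if color ≠ 1 ∧ color ≠ 2 then board
  else if x ≥ 8 ∨ x < 0 ∨ y ≥ 8 ∨ y < 0 then board
  else if get2 board x y ≠ 0 then board
  else if ¬ (dirsB.any fun d => capturesB color (runB board x y d.1 d.2)) then board
  else
    dirsB.foldl
      (fun b d => flipF color x y d.1 d.2 b (flipCount color (runB b x y d.1 d.2)))
      (set2 board x y color)

-- ===== PRECONDITION & SPEC =====
-- Pre_ excludes boards smaller than 8×8 that are reached with a valid color and
-- in-range empty-looking (x,y): there Python A raises IndexError on board[..][..].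
def Pre_let_stone (color : Int) (board : List (List Int)) (x : Int) (y : Int) : Prop :=
  ¬ (color = 1 ∨ color = 2) ∨ (x ≥ 8 ∨ x < 0 ∨ y ≥ 8 ∨ y < 0) ∨
    (8 ≤ board.length ∧ ∀ row ∈ board.take 8, 8 ≤ row.length)
instance (color : Int) (board : List (List Int)) (x : Int) (y : Int) : Decidable (Pre_let_stone color board x y) := by unfold Pre_let_stone; infer_instance

def pvWitness_let_stone : Int × List (List Int) × Int × Int :=
  (1, [[0,0,0,0,0,0,0,0],[0,0,0,0,0,0,0,0],[0,0,0,0,0,0,0,0],[0,0,0,1,2,0,0,0],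
       [0,0,0,2,1,0,0,0],[0,0,0,0,0,0,0,0],[0,0,0,0,0,0,0,0],[0,0,0,0,0,0,0,0]], 2, 3)

def Spec_let_stone (color : Int) (board : List (List Int)) (x : Int) (y : Int) (out : List (List Int)) : Prop := out = let_stone_alt color board x y
instance (color : Int) (board : List (List Int)) (x : Int) (y : Int) (out : List (List Int)) : Decidable (Spec_let_stone color board x y out) := by unfold Spec_let_stone; infer_instance

-- ===== CLAIM (what is proved, stated in full; the proofs are below) =====
def Claim_equal_let_stone : Prop := ∀ (color : Int) (board : List (List Int)) (x : Int) (y : Int), Dom_let_stone color board x y → Pre_let_stone color board x y → Spec_let_stone color board x y (let_stone color board x y)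

-- ===== LEMMAS AND PROOFS =====

-- a legal direction: components in {-1,0,1}, not both zero
def Dir (dx dy : Int) : Prop :=
  (dx = 0 ∨ dx = 1 ∨ dx = -1) ∧ (dy = 0 ∨ dy = 1 ∨ dy = -1) ∧ ¬ (dx = 0 ∧ dy = 0)

theorem cell_ne {dx dy : Int} (hd : Dir dx dy) (x y : Int) {m m' : Int} (h : m ≠ m') :
    x + m * dx ≠ x + m' * dx ∨ y + m * dy ≠ y + m' * dy := by
  obtain ⟨h1, h2, h3⟩ := hd
  rcases h1 with h1 | h1 | h1 <;> rcases h2 with h2 | h2 | h2 <;> subst h1 <;> subst h2 <;> omega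

theorem get2_set2_ne {b : List (List Int)} {i j i' j' v : Int}
    (hi : 0 ≤ i) (hj : 0 ≤ j) (hi' : 0 ≤ i') (hj' : 0 ≤ j')
    (hne : i ≠ i' ∨ j ≠ j') : get2 (set2 b i j v) i' j' = get2 b i' j' := by
  unfold get2 set2
  have hrow_ne : ∀ (r : List Int) (n n' : Nat), n ≠ n' → (b.set n r).getD n' [] = b.getD n' [] := by
    intro r n n' h
    rw [List.getD_eq_getElem?_getD, List.getElem?_set_ne h, ← List.getD_eq_getElem?_getD]
  by_cases hii : i = i'
  · have hj2 : j.toNat ≠ j'.toNat := by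
      rcases hne with h | h
      · exact absurd hii h
      · omega
    subst hii
    by_cases hlen : i.toNat < b.length
    · have hself : (b.set i.toNat ((b.getD i.toNat []).set j.toNat v)).getD i.toNat []
          = (b.getD i.toNat []).set j.toNat v := by
        rw [List.getD_eq_getElem?_getD, List.getElem?_set_self hlen]; rfl
      rw [hself, List.getD_eq_getElem?_getD, List.getElem?_set_ne hj2,
        ← List.getD_eq_getElem?_getD]
    · rw [List.set_eq_of_length_le (by omega)]
  · have h1 : i.toNat ≠ i'.toNat := by omega
    rw [hrow_ne _ _ _ h1]

theorem set2_set2_same {b : List (List Int)} {i j v : Int} :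
    set2 (set2 b i j v) i j v = set2 b i j v := by
  unfold set2
  by_cases hlen : i.toNat < b.length
  · have h1 : (b.set i.toNat ((b.getD i.toNat []).set j.toNat v)).getD i.toNat []
        = (b.getD i.toNat []).set j.toNat v := by
      rw [List.getD_eq_getElem?_getD, List.getElem?_set_self hlen]; rfl
    rw [h1, List.set_set, List.set_set]
  · have hb : b.set i.toNat ((b.getD i.toNat []).set j.toNat v) = b :=
      List.set_eq_of_length_le (by omega)
    rw [hb]; exact hb

theorem set2_comm {b : List (List Int)} {i j i' j' v w : Int}
    (hi : 0 ≤ i) (hj : 0 ≤ j) (hi' : 0 ≤ i') (hj' : 0 ≤ j')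
    (hne : i ≠ i' ∨ j ≠ j') :
    set2 (set2 b i j v) i' j' w = set2 (set2 b i' j' w) i j v := by
  unfold set2
  by_cases hii : i = i'
  · have hj2 : j.toNat ≠ j'.toNat := by
      rcases hne with h | h
      · exact absurd hii h
      · omega
    subst hii
    by_cases hlen : i.toNat < b.length
    · have hself : ∀ r : List Int, (b.set i.toNat r).getD i.toNat [] = r := by
        intro r; rw [List.getD_eq_getElem?_getD, List.getElem?_set_self (by simpa using hlen)]; rfl
      rw [hself, hself, List.set_set, List.set_set, List.set_comm _ _ hj2]
    · have hb : ∀ r : List Int, b.set i.toNat r = b := fun r =>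
        List.set_eq_of_length_le (by omega)
      simp only [hb]
  · have h1 : i.toNat ≠ i'.toNat := by omega
    have e : ∀ (r : List Int) (n n' : Nat), n ≠ n' → (b.set n r).getD n' [] = b.getD n' [] := by
      intro r n n' h
      rw [List.getD_eq_getElem?_getD, List.getElem?_set_ne h, ← List.getD_eq_getElem?_getD]
    rw [e _ _ _ h1, e _ _ _ (Ne.symm h1)]
    exact List.set_comm _ _ h1

-- generic "set these ray cells to color" fold
def setCells (color x y dx dy : Int) (b : List (List Int)) (ks : List Int) : List (List Int) :=
  ks.foldl (fun bb k => set2 bb (x + k * dx) (y + k * dy) color) b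

theorem flipF_eq_setCells (color x y dx dy : Int) (b : List (List Int)) (n : Int) :
    flipF color x y dx dy b n = setCells color x y dx dy b (PySem.List.pyRange 1 (n + 1) 1) := rfl

theorem flipF_nonpos (color x y dx dy : Int) (b : List (List Int)) {n : Int} (hn : n ≤ 0) :
    flipF color x y dx dy b n = b := by
  unfold flipF
  rw [PySem.List.pyRange_one_eq_nil (by omega)]
  rfl

theorem setCells_set_comm {color x y dx dy : Int} (hd : Dir dx dy) {b : List (List Int)}
    {m : Int} (hm : 0 ≤ x + m * dx ∧ 0 ≤ y + m * dy) {ks : List Int}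
    (hks : ∀ k ∈ ks, (0 ≤ x + k * dx ∧ 0 ≤ y + k * dy) ∧ k ≠ m) :
    setCells color x y dx dy (set2 b (x + m * dx) (y + m * dy) color) ks
      = set2 (setCells color x y dx dy b ks) (x + m * dx) (y + m * dy) color := by
  induction ks generalizing b with
  | nil => rfl
  | cons k ks ih =>
    have hk := hks k (List.mem_cons_self ..)
    simp only [setCells, List.foldl_cons]
    rw [set2_comm hm.1 hm.2 hk.1.1 hk.1.2 (cell_ne hd x y (Ne.symm hk.2))]
    exact ih (fun k' hk' => hks k' (List.mem_cons_of_mem _ hk'))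

theorem setCells_idem {color x y dx dy : Int} (hd : Dir dx dy) {b : List (List Int)}
    {ks : List Int} (hks : ∀ k ∈ ks, 0 ≤ x + k * dx ∧ 0 ≤ y + k * dy) (nd : ks.Nodup) :
    setCells color x y dx dy (setCells color x y dx dy b ks) ks
      = setCells color x y dx dy b ks := by
  induction ks generalizing b with
  | nil => rfl
  | cons k ks ih =>
    have hk := hks k (List.mem_cons_self ..)
    have hks' : ∀ k' ∈ ks, 0 ≤ x + k' * dx ∧ 0 ≤ y + k' * dy :=
      fun k' hk' => hks k' (List.mem_cons_of_mem _ hk')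
    have hnotmem : ∀ k' ∈ ks, (0 ≤ x + k' * dx ∧ 0 ≤ y + k' * dy) ∧ k' ≠ k :=
      fun k' hk' => ⟨hks' k' hk', fun he => (List.nodup_cons.mp nd).1 (he ▸ hk')⟩
    simp only [setCells, List.foldl_cons]
    have hX : set2 ((ks.foldl (fun bb k' => set2 bb (x + k' * dx) (y + k' * dy) color)
        (set2 b (x + k * dx) (y + k * dy) color))) (x + k * dx) (y + k * dy) color
        = ks.foldl (fun bb k' => set2 bb (x + k' * dx) (y + k' * dy) color)
            (set2 b (x + k * dx) (y + k * dy) color) := by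
      have := setCells_set_comm (color := color) hd (b := set2 b (x + k * dx) (y + k * dy) color)
        hk hnotmem
      simp only [setCells] at this
      rw [← this, set2_set2_same]
    rw [hX]
    have := ih (b := set2 b (x + k * dx) (y + k * dy) color) hks' (List.nodup_cons.mp nd).2
    simpa only [setCells] using this

theorem flipF_absorb {color x y dx dy : Int} (hd : Dir dx dy) {b : List (List Int)}
    {c n : Int} (hc : 0 ≤ c) (hcn : c ≤ n)
    (hcells : ∀ k : Int, 1 ≤ k → k ≤ n → 0 ≤ x + k * dx ∧ 0 ≤ y + k * dy) :
    flipF color x y dx dy (flipF color x y dx dy b c) n = flipF color x y dx dy b n := by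
  rw [flipF_eq_setCells, flipF_eq_setCells, flipF_eq_setCells,
    show PySem.List.pyRange 1 (n + 1) 1
        = PySem.List.pyRange 1 (c + 1) 1 ++ PySem.List.pyRange (c + 1) (n + 1) 1 from
      PySem.List.pyRange_one_append 1 (c + 1) (n + 1) (by omega) (by omega)]
  simp only [setCells, List.foldl_append]
  have hmem : ∀ k ∈ PySem.List.pyRange 1 (c + 1) 1, 0 ≤ x + k * dx ∧ 0 ≤ y + k * dy := by
    intro k hk
    rw [PySem.List.mem_pyRange_one] at hk
    exact hcells k hk.1 (by omega)
  have := setCells_idem (color := color) hd (b := b) hmem (PySem.List.nodup_pyRange_one 1 (c + 1))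
  simp only [setCells] at this
  rw [this]

theorem get2_setCells_ne {color x y dx dy : Int} (hd : Dir dx dy) {b : List (List Int)}
    {m : Int} (hm : 0 ≤ x + m * dx ∧ 0 ≤ y + m * dy) {ks : List Int}
    (hks : ∀ k ∈ ks, (0 ≤ x + k * dx ∧ 0 ≤ y + k * dy) ∧ k ≠ m) :
    get2 (setCells color x y dx dy b ks) (x + m * dx) (y + m * dy)
      = get2 b (x + m * dx) (y + m * dy) := by
  induction ks generalizing b with
  | nil => rfl
  | cons k ks ih =>
    have hk := hks k (List.mem_cons_self ..)
    simp only [setCells, List.foldl_cons]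
    have := ih (b := set2 b (x + k * dx) (y + k * dy) color)
      (fun k' hk' => hks k' (List.mem_cons_of_mem _ hk'))
    simp only [setCells] at this
    rw [this]
    exact get2_set2_ne hk.1.1 hk.1.2 hm.1 hm.2 (cell_ne hd x y hk.2)

theorem runAux_flipF {color x y dx dy : Int} (hd : Dir dx dy) {c : Int} (_hc : 0 ≤ c)
    (hcells : ∀ k : Int, 1 ≤ k → k ≤ c → 0 ≤ x + k * dx ∧ 0 ≤ y + k * dy) :
    ∀ (f : Nat) (m : Int) (b : List (List Int)), c < m →
    runAux (flipF color x y dx dy b c) dx dy (x + m * dx) (y + m * dy) f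
      = runAux b dx dy (x + m * dx) (y + m * dy) f := by
  intro f
  induction f with
  | zero => intro m b _; rfl
  | succ f ih =>
    intro m b hcm
    simp only [runAux]
    by_cases hin : 0 ≤ x + m * dx ∧ x + m * dx < 8 ∧ 0 ≤ y + m * dy ∧ y + m * dy < 8
    · rw [if_pos hin, if_pos hin]
      have hmem : ∀ k ∈ PySem.List.pyRange 1 (c + 1) 1,
          (0 ≤ x + k * dx ∧ 0 ≤ y + k * dy) ∧ k ≠ m := by
        intro k hk
        rw [PySem.List.mem_pyRange_one] at hk
        exact ⟨hcells k hk.1 (by omega), by omega⟩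
      have hg : get2 (flipF color x y dx dy b c) (x + m * dx) (y + m * dy)
          = get2 b (x + m * dx) (y + m * dy) := by
        rw [flipF_eq_setCells]
        exact get2_setCells_ne hd ⟨hin.1, hin.2.2.1⟩ hmem
      rw [hg]
      by_cases hz : get2 b (x + m * dx) (y + m * dy) = 0
      · rw [if_pos hz, if_pos hz]
      · rw [if_neg hz, if_neg hz]
        have hx2 : x + m * dx + dx = x + (m + 1) * dx := by ring
        have hy2 : y + m * dy + dy = y + (m + 1) * dy := by ring
        rw [hx2, hy2, ih (m + 1) b (by omega)]
    · rw [if_neg hin, if_neg hin]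

-- positions read by runAux are in range
theorem runAux_inrange {dx dy : Int} :
    ∀ (f : Nat) (m : Int) (b : List (List Int)) (x y : Int) (t : Nat),
    t < (runAux b dx dy (x + m * dx) (y + m * dy) f).length →
    0 ≤ x + (m + t) * dx ∧ x + (m + t) * dx < 8 ∧ 0 ≤ y + (m + t) * dy ∧ y + (m + t) * dy < 8 := by
  intro f
  induction f with
  | zero => intro m b x y t ht; simp [runAux] at ht
  | succ f ih =>
    intro m b x y t ht
    simp only [runAux] at ht
    by_cases hin : 0 ≤ x + m * dx ∧ x + m * dx < 8 ∧ 0 ≤ y + m * dy ∧ y + m * dy < 8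
    · rw [if_pos hin] at ht
      by_cases hz : get2 b (x + m * dx) (y + m * dy) = 0
      · rw [if_pos hz] at ht; simp at ht
      · rw [if_neg hz] at ht
        simp only [List.length_cons] at ht
        cases t with
        | zero => simpa using hin
        | succ t =>
          have hx2 : x + m * dx + dx = x + (m + 1) * dx := by ring
          have hy2 : y + m * dy + dy = y + (m + 1) * dy := by ring
          rw [hx2, hy2] at ht
          have := ih (m + 1) b x y t (by omega)
          have harg : m + 1 + (t : Int) = m + ((t : Nat) + 1 : Nat) := by push_cast; ring
          rw [harg] at this
          exact this
    · rw [if_neg hin] at ht; simp at ht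

theorem lsFlip_eq {color x y dx dy : Int} :
    ∀ (n : Nat) (b : List (List Int)) (m : Int),
    lsFlip color dx dy b (x + m * dx) (y + m * dy) n
      = setCells color x y dx dy b (PySem.List.pyRange (m + 1) (m + n + 1) 1) := by
  intro n
  induction n with
  | zero =>
    intro b m
    rw [show PySem.List.pyRange (m + 1) (m + (0 : Nat) + 1) 1 = [] from
      PySem.List.pyRange_one_eq_nil (by push_cast; omega)]
    rfl
  | succ n ih =>
    intro b m
    have hx2 : x + m * dx + dx = x + (m + 1) * dx := by ring
    have hy2 : y + m * dy + dy = y + (m + 1) * dy := by ring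
    simp only [lsFlip, hx2, hy2]
    rw [ih (set2 b (x + (m + 1) * dx) (y + (m + 1) * dy) color) (m + 1)]
    rw [show PySem.List.pyRange (m + 1) (m + ((n : Nat) + 1 : Nat) + 1) 1
        = (m + 1) :: PySem.List.pyRange (m + 1 + 1) (m + ((n : Nat) + 1 : Nat) + 1) 1 from
      PySem.List.pyRange_one_cons (by push_cast; omega)]
    simp only [setCells, List.foldl_cons]
    congr 2
    push_cast
    ring

theorem lsFlip_flipF {color x y dx dy : Int} {cnt : Int} (hc : 0 ≤ cnt) (b : List (List Int)) :
    lsFlip color dx dy b x y cnt.toNat = flipF color x y dx dy b cnt := by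
  have h := lsFlip_eq (color := color) (x := x) (y := y) (dx := dx) (dy := dy) cnt.toNat b 0
  have e1 : x + 0 * dx = x := by ring
  have e2 : y + 0 * dy = y := by ring
  rw [e1, e2] at h
  rw [h, flipF_eq_setCells]
  congr 2
  omega

-- the spec of A's per-direction flip total: stones seen before the last own-color stone
def Wspec (color : Int) : List Int → Int → Int
  | [], _ => 0
  | v :: vs, cnt => if v = color then max cnt (Wspec color vs cnt) else Wspec color vs (cnt + 1)

theorem Wspec_nonneg (color : Int) : ∀ (vals : List Int) (cnt : Int), 0 ≤ cnt → 0 ≤ Wspec color vals cnt := by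
  intro vals
  induction vals with
  | nil => intro cnt h; simp [Wspec]
  | cons v vs ih =>
    intro cnt h
    simp only [Wspec]
    split
    · have := ih cnt h; omega
    · exact ih (cnt + 1) (by omega)

theorem Wspec_le (color : Int) : ∀ (vals : List Int) (cnt : Int), 0 ≤ cnt →
    Wspec color vals cnt ≤ cnt + vals.length := by
  intro vals
  induction vals with
  | nil => intro cnt h; simp [Wspec]; omega
  | cons v vs ih =>
    intro cnt h
    simp only [Wspec, List.length_cons]
    split
    · have := ih cnt h; omega
    · have := ih (cnt + 1) (by omega); push_cast; push_cast at this; omega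

theorem Wspec_cases (color : Int) : ∀ (vals : List Int) (cnt : Int), 0 ≤ cnt →
    Wspec color vals cnt = 0 ∨ cnt ≤ Wspec color vals cnt := by
  intro vals
  induction vals with
  | nil => intro cnt h; simp [Wspec]
  | cons v vs ih =>
    intro cnt h
    simp only [Wspec]
    split
    · right; omega
    · have := ih (cnt + 1) (by omega); omega

theorem flipCount_eq (color : Int) (vals : List Int) :
    flipCount color vals = Wspec color vals 0 := by
  have key : ∀ (vs : List Int) (n0 opp : Int), 0 ≤ n0 → n0 ≤ opp →
      (vs.foldl (fun (p : Int × Int) v => if v = color then (p.2, p.2) else (p.1, p.2 + 1))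
        (n0, opp)).1 = max n0 (Wspec color vs opp) := by
    intro vs
    induction vs with
    | nil => intro n0 opp h1 h2; simp [Wspec]; omega
    | cons v vs ih =>
      intro n0 opp h1 h2
      simp only [List.foldl_cons, Wspec]
      by_cases hv : v = color
      · rw [if_pos hv, if_pos hv]
        have := ih opp opp (by omega) le_rfl
        omega
      · rw [if_neg hv, if_neg hv]
        exact ih n0 (opp + 1) h1 (by omega)
  have h := key vals 0 0 le_rfl le_rfl
  unfold flipCount
  rw [h]
  have := Wspec_nonneg color vals 0 le_rfl
  omega

-- the main per-direction lemma: A's mutating walk = flip the Wspec-prefix in one pass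
theorem main_walk {color x y dx dy : Int} (hd : Dir dx dy) :
    ∀ (f : Nat) (k cnt : Int) (b : List (List Int)), 0 ≤ cnt → cnt ≤ k →
    (∀ m : Int, 1 ≤ m → m ≤ k →
      0 ≤ x + m * dx ∧ x + m * dx < 8 ∧ 0 ≤ y + m * dy ∧ y + m * dy < 8) →
    lsWalk color x y dx dy b (x + k * dx) (y + k * dy) cnt f
      = flipF color x y dx dy b
          (Wspec color (runAux b dx dy (x + (k + 1) * dx) (y + (k + 1) * dy) f) cnt) := by
  intro f
  induction f with
  | zero =>
    intro k cnt b _ _ _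
    rw [show Wspec color (runAux b dx dy (x + (k + 1) * dx) (y + (k + 1) * dy) 0) cnt = 0 from rfl,
      flipF_nonpos color x y dx dy b le_rfl]
    rfl
  | succ f ih =>
    intro k cnt b hcnt hck hcells
    have hx1 : x + k * dx + dx = x + (k + 1) * dx := by ring
    have hy1 : y + k * dy + dy = y + (k + 1) * dy := by ring
    simp only [lsWalk, runAux, hx1, hy1]
    by_cases hin : 0 ≤ x + (k + 1) * dx ∧ x + (k + 1) * dx < 8 ∧ 0 ≤ y + (k + 1) * dy ∧ y + (k + 1) * dy < 8
    · have hg : ¬ (x + (k + 1) * dx ≥ 8 ∨ x + (k + 1) * dx < 0 ∨ y + (k + 1) * dy ≥ 8 ∨ y + (k + 1) * dy < 0) := by omega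
      rw [if_neg hg, if_pos hin]
      have hcells' : ∀ m : Int, 1 ≤ m → m ≤ k + 1 →
          0 ≤ x + m * dx ∧ x + m * dx < 8 ∧ 0 ≤ y + m * dy ∧ y + m * dy < 8 := by
        intro m h1 h2
        by_cases hmk : m ≤ k
        · exact hcells m h1 hmk
        · have : m = k + 1 := by omega
          rw [this]; exact hin
      by_cases hz : get2 b (x + (k + 1) * dx) (y + (k + 1) * dy) = 0
      · rw [if_pos hz, if_pos hz,
          show Wspec color ([] : List Int) cnt = 0 from rfl,
          flipF_nonpos color x y dx dy b le_rfl]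
      · rw [if_neg hz, if_neg hz]
        have hx2 : x + (k + 1) * dx + dx = x + (k + 1 + 1) * dx := by ring
        have hy2 : y + (k + 1) * dy + dy = y + (k + 1 + 1) * dy := by ring
        rw [hx2, hy2]
        by_cases hv : get2 b (x + (k + 1) * dx) (y + (k + 1) * dy) = color
        · rw [if_pos hv]
          rw [lsFlip_flipF hcnt]
          have hflipcells : ∀ kk : Int, 1 ≤ kk → kk ≤ cnt → 0 ≤ x + kk * dx ∧ 0 ≤ y + kk * dy := by
            intro kk h1 h2
            have := hcells kk h1 (by omega)
            exact ⟨this.1, this.2.2.1⟩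
          have hrun : runAux (flipF color x y dx dy b cnt) dx dy
              (x + (k + 1 + 1) * dx) (y + (k + 1 + 1) * dy) f
              = runAux b dx dy (x + (k + 1 + 1) * dx) (y + (k + 1 + 1) * dy) f :=
            runAux_flipF hd hcnt hflipcells f (k + 1 + 1) b (by omega)
          have hih := ih (k + 1) cnt (flipF color x y dx dy b cnt) hcnt (by omega) hcells'
          rw [hih, hrun]
          set tail := runAux b dx dy (x + (k + 1 + 1) * dx) (y + (k + 1 + 1) * dy) f with htail
          rw [show Wspec color (get2 b (x + (k + 1) * dx) (y + (k + 1) * dy) :: tail) cnt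
              = if get2 b (x + (k + 1) * dx) (y + (k + 1) * dy) = color
                then max cnt (Wspec color tail cnt) else Wspec color tail (cnt + 1) from rfl,
            if_pos hv]
          rcases Wspec_cases color tail cnt hcnt with h0 | hge
          · rw [h0, flipF_nonpos color x y dx dy _ le_rfl,
              show max cnt (0 : Int) = cnt from by omega]
          · rw [show max cnt (Wspec color tail cnt) = Wspec color tail cnt from by omega]
            apply flipF_absorb hd hcnt hge
            intro m h1 h2
            by_cases hmk : m ≤ k + 1
            · have := hcells' m h1 hmk
              exact ⟨this.1, this.2.2.1⟩
            · have hlen := Wspec_le color tail cnt hcnt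
              have ht : ((m - (k + 1 + 1)).toNat) < tail.length := by omega
              have hrange := runAux_inrange f (k + 1 + 1) b x y ((m - (k + 1 + 1)).toNat) ht
              have harg : k + 1 + 1 + ((m - (k + 1 + 1)).toNat : Int) = m := by omega
              rw [harg] at hrange
              exact ⟨hrange.1, hrange.2.2.1⟩
        · rw [if_neg hv]
          have hih := ih (k + 1) (cnt + 1) b (by omega) (by omega) hcells'
          rw [hih,
            show Wspec color (get2 b (x + (k + 1) * dx) (y + (k + 1) * dy)
                :: runAux b dx dy (x + (k + 1 + 1) * dx) (y + (k + 1 + 1) * dy) f) cnt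
              = if get2 b (x + (k + 1) * dx) (y + (k + 1) * dy) = color
                then max cnt (Wspec color (runAux b dx dy (x + (k + 1 + 1) * dx) (y + (k + 1 + 1) * dy) f) cnt)
                else Wspec color (runAux b dx dy (x + (k + 1 + 1) * dx) (y + (k + 1 + 1) * dy) f) (cnt + 1) from rfl,
            if_neg hv]
    · have hg : x + (k + 1) * dx ≥ 8 ∨ x + (k + 1) * dx < 0 ∨ y + (k + 1) * dy ≥ 8 ∨ y + (k + 1) * dy < 0 := by omega
      rw [if_pos hg, if_neg hin,
        show Wspec color ([] : List Int) cnt = 0 from rfl,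
        flipF_nonpos color x y dx dy b le_rfl]

theorem dir_eq {color x y dx dy : Int} (hd : Dir dx dy) (b : List (List Int)) :
    lsWalk color x y dx dy b x y 0 8
      = flipF color x y dx dy b (flipCount color (runB b x y dx dy)) := by
  have h := main_walk (color := color) (x := x) (y := y) hd 8 0 0 b le_rfl le_rfl
    (fun m h1 h2 => absurd h1 (by omega))
  have e1 : x + 0 * dx = x := by ring
  have e2 : y + 0 * dy = y := by ring
  have e3 : x + (0 + 1) * dx = x + dx := by ring
  have e4 : y + (0 + 1) * dy = y + dy := by ring
  rw [e1, e2, e3, e4] at h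
  rw [h, flipCount_eq]
  rfl

-- check_place's walk = B's captures on the collected ray
def capAuxI (color : Int) : List Int → Int → Bool
  | [], _ => false
  | v :: vs, cnt => if v = color then decide (cnt ≠ 0) else capAuxI color vs (cnt + 1)

theorem cp_char {color x y dx dy : Int} (board : List (List Int)) :
    ∀ (f : Nat) (k cnt : Int),
    cpWalk color board dx dy (x + k * dx) (y + k * dy) cnt f
      = capAuxI color (runAux board dx dy (x + (k + 1) * dx) (y + (k + 1) * dy) f) cnt := by
  intro f
  induction f with
  | zero => intro k cnt; rfl
  | succ f ih =>
    intro k cnt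
    have hx1 : x + k * dx + dx = x + (k + 1) * dx := by ring
    have hy1 : y + k * dy + dy = y + (k + 1) * dy := by ring
    simp only [cpWalk, runAux, hx1, hy1]
    by_cases hin : 0 ≤ x + (k + 1) * dx ∧ x + (k + 1) * dx < 8 ∧ 0 ≤ y + (k + 1) * dy ∧ y + (k + 1) * dy < 8
    · have hg : ¬ (x + (k + 1) * dx ≥ 8 ∨ x + (k + 1) * dx < 0 ∨ y + (k + 1) * dy ≥ 8 ∨ y + (k + 1) * dy < 0) := by omega
      rw [if_neg hg, if_pos hin]
      by_cases hz : get2 board (x + (k + 1) * dx) (y + (k + 1) * dy) = 0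
      · rw [if_pos hz, if_pos hz]; rfl
      · rw [if_neg hz, if_neg hz]
        by_cases hv : get2 board (x + (k + 1) * dx) (y + (k + 1) * dy) = color
        · rw [if_neg (by simp [hv]), show capAuxI color (get2 board (x + (k + 1) * dx) (y + (k + 1) * dy) :: runAux board dx dy (x + (k + 1) * dx + dx) (y + (k + 1) * dy + dy) f) cnt = if get2 board (x + (k + 1) * dx) (y + (k + 1) * dy) = color then decide (cnt ≠ 0) else capAuxI color (runAux board dx dy (x + (k + 1) * dx + dx) (y + (k + 1) * dy + dy) f) (cnt + 1) from rfl, if_pos hv]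
          by_cases hc0 : cnt = 0
          · rw [if_pos hc0]; simp [hc0]
          · rw [if_neg hc0]; simp [hc0]
        · rw [if_pos (by simp [hv]), show capAuxI color (get2 board (x + (k + 1) * dx) (y + (k + 1) * dy) :: runAux board dx dy (x + (k + 1) * dx + dx) (y + (k + 1) * dy + dy) f) cnt = if get2 board (x + (k + 1) * dx) (y + (k + 1) * dy) = color then decide (cnt ≠ 0) else capAuxI color (runAux board dx dy (x + (k + 1) * dx + dx) (y + (k + 1) * dy + dy) f) (cnt + 1) from rfl, if_neg hv]
          have hx2 : x + (k + 1) * dx + dx = x + (k + 1 + 1) * dx := by ring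
          have hy2 : y + (k + 1) * dy + dy = y + (k + 1 + 1) * dy := by ring
          rw [hx2, hy2]
          exact ih (k + 1) (cnt + 1)
    · have hg : x + (k + 1) * dx ≥ 8 ∨ x + (k + 1) * dx < 0 ∨ y + (k + 1) * dy ≥ 8 ∨ y + (k + 1) * dy < 0 := by omega
      rw [if_pos hg, if_neg hin]
      rfl

theorem capAuxI_eq (color : Int) : ∀ (vals : List Int) (q : Nat),
    capAuxI color vals (q : Int) = capAux color vals q := by
  intro vals
  induction vals with
  | nil => intro q; rfl
  | cons v vs ih =>
    intro q
    simp only [capAuxI, capAux]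
    split
    · simp only [decide_eq_decide]; omega
    · have := ih (q + 1); push_cast at this ⊢; exact this

theorem cap_dir {color x y dx dy : Int} (board : List (List Int)) :
    cpWalk color board dx dy x y 0 8 = capturesB color (runB board x y dx dy) := by
  have h := cp_char (color := color) (x := x) (y := y) (dx := dx) (dy := dy) board 8 0 0
  have e1 : x + 0 * dx = x := by ring
  have e2 : y + 0 * dy = y := by ring
  have e3 : x + (0 + 1) * dx = x + dx := by ring
  have e4 : y + (0 + 1) * dy = y + dy := by ring
  rw [e1, e2, e3, e4] at h
  rw [h]
  have := capAuxI_eq color (runAux board dx dy (x + dx) (y + dy) 8) 0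
  simpa [capturesB, runB] using this

theorem let_stone_eq (color : Int) (board : List (List Int)) (x y : Int) :
    let_stone color board x y = let_stone_alt color board x y := by
  unfold let_stone let_stone_alt
  by_cases hcol : color = 1 ∨ color = 2
  · have hcc : color_check color = true := by
      unfold color_check; rcases hcol with h | h <;> simp [h]
    have hBne : ¬ (color ≠ 1 ∧ color ≠ 2) := by tauto
    rw [if_neg hBne]
    by_cases hrange : x ≥ 8 ∨ x < 0 ∨ y ≥ 8 ∨ y < 0
    · have hcp : check_place color board x y = false := by
        unfold check_place
        rw [if_neg (by simp [hcc]), if_pos hrange]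
      rw [if_pos (by simp [hcp]), if_pos hrange]
    · rw [if_neg hrange]
      by_cases hocc : get2 board x y ≠ 0
      · have hcp : check_place color board x y = false := by
          unfold check_place
          rw [if_neg (by simp [hcc]), if_neg hrange, if_pos hocc]
        rw [if_pos (by simp [hcp]), if_pos hocc]
      · rw [if_neg hocc]
        have hr : PySem.List.pyRange 0 8 1 = [0, 1, 2, 3, 4, 5, 6, 7] := by decide
        have hcp : check_place color board x y
            = (dirsB.any fun d => capturesB color (runB board x y d.1 d.2)) := by
          unfold check_place
          rw [if_neg (by simp [hcc]), if_neg hrange, if_neg hocc, hr]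
          simp only [List.any_cons, List.any_nil, dirsB]
          norm_num [dxA, dyA]
          simp only [show Int.toNat 2 = 2 from rfl, show Int.toNat 3 = 3 from rfl,
            show Int.toNat 4 = 4 from rfl, show Int.toNat 5 = 5 from rfl,
            show Int.toNat 6 = 6 from rfl, show Int.toNat 7 = 7 from rfl]
          norm_num
          simp only [cap_dir]
        rw [hcp]
        by_cases hc2 : (dirsB.any fun d => capturesB color (runB board x y d.1 d.2)) = true
        · rw [if_neg (by simp [hc2]), if_neg (by simp [hc2]), hr]
          simp only [List.foldl_cons, List.foldl_nil, dirsB]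
          norm_num [dxA, dyA]
          simp only [show Int.toNat 2 = 2 from rfl, show Int.toNat 3 = 3 from rfl,
            show Int.toNat 4 = 4 from rfl, show Int.toNat 5 = 5 from rfl,
            show Int.toNat 6 = 6 from rfl, show Int.toNat 7 = 7 from rfl]
          norm_num
          have d1 : Dir 0 (-1) := by unfold Dir; omega
          have d2 : Dir 0 1 := by unfold Dir; omega
          have d3 : Dir (-1) 0 := by unfold Dir; omega
          have d4 : Dir 1 0 := by unfold Dir; omega
          have d5 : Dir (-1) (-1) := by unfold Dir; omega
          have d6 : Dir (-1) 1 := by unfold Dir; omega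
          have d7 : Dir 1 (-1) := by unfold Dir; omega
          have d8 : Dir 1 1 := by unfold Dir; omega
          rw [dir_eq d1, dir_eq d2, dir_eq d3, dir_eq d4, dir_eq d5, dir_eq d6, dir_eq d7,
            dir_eq d8]
        · rw [if_pos (by simp [hc2]), if_pos (by simp [hc2])]
  · have h1 : color ≠ 1 := fun h => hcol (Or.inl h)
    have h2 : color ≠ 2 := fun h => hcol (Or.inr h)
    have hcc : color_check color = false := by unfold color_check; simp [h1, h2]
    have hcp : check_place color board x y = false := by
      unfold check_place
      rw [if_pos (by simp [hcc])]
    rw [if_pos (by simp [hcp]), if_pos ⟨h1, h2⟩]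

-- ===== VERDICT (by name: the statement is the Claim_ definition above) =====
theorem let_stone_spec : Claim_equal_let_stone := by
  intro color board x y _ _
  exact let_stone_eq color board x y
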